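-- pv_equiv track=rewrite | github.com/jacopotediosi/octoscanner | src/octoscanner/generator/processors/python_settings.py | _find_removed_settings_paths
-- ===== SOURCE A (Python) =====
-- def _find_removed_settings_paths(
--     old_paths: set[tuple[str, ...]],
--     new_paths: set[tuple[str, ...]],
-- ) -> set[tuple[str, ...]]:
--     """Find settings paths removed between two OctoPrint versions, collapsed to
--     their highest fully-removed ancestor prefix.
--
--     For example, if ``serial.capabilities.autoreport_pos``,
--     ``serial.capabilities.autoreport_temp``, etc. are all removed and NO path
--     starting with ``serial`` survives in ``new_paths``, emit just ``serial``
--     instead of each individual leaf.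
--
--     Args:
--         old_paths (set[tuple[str, ...]]): All settings paths in the old version.
--         new_paths (set[tuple[str, ...]]): All settings paths in the new version.
--
--     Returns:
--         set[tuple[str, ...]]: Set of removed paths to emit rules for.
--     """
--
--     def has_comparable_in_new(path: tuple[str, ...]) -> bool:
--         """True if any new_paths path is a prefix of, equal to, or extends *path*."""
--         return any(np[: len(path)] == path or path[: len(np)] == np for np in new_paths)
--
--     def is_fully_removed(prefix: tuple[str, ...]) -> bool:
--         """True if no path in new_paths starts with *prefix*."""
--         return not any(p[: len(prefix)] == prefix for p in new_paths)
--
--     result = set()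
--
--     for path in old_paths - new_paths:
--         # Skip paths that still exist in some form in the new schema
--         # (widened to a nested object, or narrowed into a generic container).
--         if has_comparable_in_new(path):
--             continue
--
--         # Shorten to the highest ancestor prefix that is fully removed.
--         # If none qualifies, keep the full path.
--         shortened = path
--         for i in range(1, len(path)):
--             prefix = path[:i]
--             if is_fully_removed(prefix):
--                 shortened = prefix
--                 break
--         result.add(shortened)
--
--     return result
-- ===== SOURCE B (Python) =====
-- def _find_removed_settings_paths(
--     old_paths: set[tuple[str, ...]],
--     new_paths: set[tuple[str, ...]],
-- ) -> set[tuple[str, ...]]: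
--     """Removed settings paths, collapsed to their highest fully-removed
--     ancestor prefix — computed by a single incremental descent per path.
--
--     Instead of re-scanning all of new_paths for every candidate prefix, we
--     narrow, component by component, the list of new paths consistent with the
--     prefix consumed so far (a trie descent over index-filtered candidates).
--     """
--     new_list = list(new_paths)
--     result = set()
--     for path in old_paths:
--         if path in new_paths:
--             continue
--         cands = new_list  # new paths extending the consumed prefix path[:i]
--         comparable = False
--         emitted = None
--         for i, comp in enumerate(path):
--             if any(len(c) == i for c in cands):
--                 # A complete new path is a proper prefix of `path`.
--                 comparable = True
--                 break
--             nxt = [c for c in cands if len(c) > i and c[i] == comp]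
--             if not nxt:
--                 # path[:i+1] is the shortest fully-removed prefix.
--                 emitted = path[: i + 1]
--                 break
--             cands = nxt
--         else:
--             if cands:
--                 # Descended through every component: some new path extends it.
--                 comparable = True
--         if comparable:
--             continue
--         result.add(path if emitted is None else emitted)
--     return result
-- ===== Notes on version B (the rewrite author's own statement) =====
-- stated objective: alternative
-- what changed: Instead of re-scanning all of new_paths for the comparable test and again for every candidate prefix length, B makes one incremental trie-style descent per removed path, narrowing the list of candidate new paths component by component and emitting the prefix at the first failed step.
import Mathlib
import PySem

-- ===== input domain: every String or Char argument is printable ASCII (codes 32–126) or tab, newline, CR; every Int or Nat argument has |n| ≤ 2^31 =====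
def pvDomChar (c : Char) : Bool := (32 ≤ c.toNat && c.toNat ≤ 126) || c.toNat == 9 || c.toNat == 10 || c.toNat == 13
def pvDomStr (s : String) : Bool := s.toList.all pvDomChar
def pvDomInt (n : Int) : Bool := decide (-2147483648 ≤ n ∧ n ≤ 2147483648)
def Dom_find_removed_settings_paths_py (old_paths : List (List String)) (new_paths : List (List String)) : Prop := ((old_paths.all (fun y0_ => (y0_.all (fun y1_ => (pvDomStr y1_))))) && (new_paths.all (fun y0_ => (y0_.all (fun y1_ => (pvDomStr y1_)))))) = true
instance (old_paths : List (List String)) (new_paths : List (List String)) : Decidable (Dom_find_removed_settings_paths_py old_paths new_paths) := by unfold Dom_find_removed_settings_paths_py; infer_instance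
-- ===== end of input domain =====

-- B replaces A's repeated whole-set scans (comparable test plus one scan per candidate prefix) by a
-- single incremental trie-style descent per path over narrowing suffix lists; equal output, similar cost.

-- ===== PORT A =====
def pvHasComparable (new_paths : List (List String)) (path : List String) : Bool :=
  new_paths.any (fun np => np.take path.length == path || path.take np.length == np)

def pvIsFullyRemoved (new_paths : List (List String)) (pfx : List String) : Bool :=
  !(new_paths.any (fun p => p.take pfx.length == pfx))

-- A's 'for i in range(1, len(path)): … break' search for the highest fully-removed prefix
def pvShortGo (new_paths : List (List String)) (path : List String) (i : Nat) : List String :=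
  if i < path.length then
    if pvIsFullyRemoved new_paths (path.take i) then path.take i else pvShortGo new_paths path (i+1)
  else path
  termination_by path.length - i

def find_removed_settings_paths_py (old_paths : List (List String)) (new_paths : List (List String)) : List (List String) :=
  (PySem.Set.diff (PySem.Set.ofList old_paths) new_paths).foldl
    (fun result path =>
      if pvHasComparable new_paths path then result
      else PySem.Set.add result (pvShortGo new_paths path 1))
    PySem.Set.empty

-- ===== PORT B =====
-- the per-path descent loop of Source B: comps = remaining components, i = depth, cands = suffix lists
def pvDescend (path : List String) : List String → Nat → List (List String) → Option (List String)
  | [], _, cands => if cands.isEmpty then some path else none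
  | comp :: rest, i, cands =>
    if cands.any (fun c => c.length == i) then none
    else
      let nxt := cands.filter (fun c => match getElem? c i with
        | some x => x == comp
        | none => false)
      if nxt.isEmpty then some (path.take (i+1))
      else pvDescend path rest (i+1) nxt

def find_removed_settings_paths_py_alt (old_paths : List (List String)) (new_paths : List (List String)) : List (List String) :=
  (PySem.Set.ofList old_paths).foldl
    (fun result path =>
      if new_paths.contains path then result
      else match pvDescend path path 0 new_paths with
        | none => result
        | some e => PySem.Set.add result e)
    PySem.Set.empty

-- ===== PRECONDITION & SPEC =====
def Spec_find_removed_settings_paths_py (old_paths : List (List String)) (new_paths : List (List String)) (out : List (List String)) : Prop := out = find_removed_settings_paths_py_alt old_paths new_paths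
instance (old_paths : List (List String)) (new_paths : List (List String)) (out : List (List String)) : Decidable (Spec_find_removed_settings_paths_py old_paths new_paths out) := by unfold Spec_find_removed_settings_paths_py; infer_instance

-- ===== CLAIM (what is proved, stated in full; the proofs are below) =====
def Claim_equal_find_removed_settings_paths_py : Prop := ∀ (old_paths : List (List String)) (new_paths : List (List String)), Dom_find_removed_settings_paths_py old_paths new_paths → Spec_find_removed_settings_paths_py old_paths new_paths (find_removed_settings_paths_py old_paths new_paths)

-- ===== LEMMAS AND PROOFS =====

-- proof-side view: the new paths extending a given prefix
def pvFilt (pfx : List String) (nps : List (List String)) : List (List String) :=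
  nps.filter (fun np => pfx.isPrefixOf np)

theorem pvFilt_nil (nps : List (List String)) : pvFilt [] nps = nps := by
  simp [pvFilt]

theorem pvFilt_eq_nil_iff (pfx : List String) (nps : List (List String)) :
    pvFilt pfx nps = [] ↔ ∀ np ∈ nps, ¬ pfx <+: np := by
  simp [pvFilt, List.filter_eq_nil_iff, List.isPrefixOf_iff_prefix]

theorem pvFilt_any_len (pfx : List String) (nps : List (List String)) :
    ((pvFilt pfx nps).any (fun c => c.length == pfx.length)) = true ↔ pfx ∈ nps := by
  simp only [pvFilt, List.any_eq_true, List.mem_filter, beq_iff_eq, List.isPrefixOf_iff_prefix]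
  constructor
  · rintro ⟨np, ⟨hm, hpre⟩, hlen⟩
    have : pfx = np := hpre.eq_of_length (by omega)
    rw [this]
    exact hm
  · intro hm
    exact ⟨pfx, ⟨hm, List.prefix_refl pfx⟩, rfl⟩

theorem pvFilt_step (path : List String) (nps : List (List String)) (i : Nat) (h : i < path.length) :
    (pvFilt (path.take i) nps).filter (fun c => match getElem? c i with
        | some x => x == path[i]
        | none => false)
      = pvFilt (path.take (i+1)) nps := by
  have hlen : (path.take i).length = i := List.length_take_of_le (le_of_lt h)
  have htake1 : path.take (i+1) = path.take i ++ [path[i]] := by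
    rw [List.take_add_one]
    simp [List.getElem?_eq_getElem h]
  simp only [pvFilt, List.filter_filter]
  apply List.filter_congr
  intro np _
  by_cases hpre : (path.take i) <+: np
  · rw [List.isPrefixOf_iff_prefix.mpr hpre]
    obtain ⟨s, hs⟩ := hpre
    subst hs
    have hget : (path.take i ++ s)[i]? = s[0]? := by
      rw [List.getElem?_append_right (by omega)]
      simp [hlen]
    rw [hget]
    cases s with
    | nil =>
      have h2 : ¬ (path.take (i+1)).isPrefixOf (path.take i) := by
        rw [List.isPrefixOf_iff_prefix, htake1]
        intro hp
        have := hp.length_le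
        simp [hlen] at this
        omega
      simp [h2]
    | cons x xs =>
      by_cases hx : x = path[i]
      · subst hx
        have hp : (path.take (i+1)).isPrefixOf (path.take i ++ path[i] :: xs) := by
          rw [List.isPrefixOf_iff_prefix, htake1]
          exact (List.prefix_append_right_inj _).mpr ⟨xs, rfl⟩
        simp [hp]
      · have hp : ¬ (path.take (i+1)).isPrefixOf (path.take i ++ x :: xs) := by
          rw [List.isPrefixOf_iff_prefix, htake1]
          intro hp
          exact hx (((List.cons_prefix_cons).mp ((List.prefix_append_right_inj _).mp hp)).1.symm)
        simp [hp, hx]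
  · rw [Bool.eq_false_iff.mpr (fun hh => hpre (List.isPrefixOf_iff_prefix.mp hh))]
    have : ¬ (path.take (i+1)).isPrefixOf np := by
      rw [List.isPrefixOf_iff_prefix]
      intro hp
      exact hpre ((List.take_prefix_take_left (by omega)).trans hp)
    simp [this]

theorem pvIsFullyRemoved_iff (new_paths : List (List String)) (pfx : List String) :
    pvIsFullyRemoved new_paths pfx = true ↔ pvFilt pfx new_paths = [] := by
  rw [pvFilt_eq_nil_iff]
  simp only [pvIsFullyRemoved, Bool.not_eq_true', List.any_eq_false, beq_iff_eq]
  constructor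
  · intro hh np hm hpre
    exact hh np hm (List.prefix_iff_eq_take.mp hpre).symm
  · intro hh np hm heq
    exact hh np hm (List.prefix_iff_eq_take.mpr heq.symm)

theorem pvHasComparable_iff (new_paths : List (List String)) (path : List String) :
    pvHasComparable new_paths path = true ↔ ∃ np ∈ new_paths, path <+: np ∨ np <+: path := by
  simp only [pvHasComparable, List.any_eq_true, Bool.or_eq_true, beq_iff_eq]
  constructor
  · rintro ⟨np, hm, h | h⟩
    · exact ⟨np, hm, Or.inl (List.prefix_iff_eq_take.mpr h.symm)⟩
    · exact ⟨np, hm, Or.inr (List.prefix_iff_eq_take.mpr h.symm)⟩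
  · rintro ⟨np, hm, h | h⟩
    · exact ⟨np, hm, Or.inl (List.prefix_iff_eq_take.mp h).symm⟩
    · exact ⟨np, hm, Or.inr (List.prefix_iff_eq_take.mp h).symm⟩

theorem pvShortGo_of_none (new_paths : List (List String)) (path : List String) (i : Nat)
    (h : ∀ j, i ≤ j → j < path.length → pvIsFullyRemoved new_paths (path.take j) = false) :
    pvShortGo new_paths path i = path := by
  rw [pvShortGo]
  split
  · rename_i hi
    rw [h i le_rfl hi]
    simp only [Bool.false_eq_true, if_false]
    exact pvShortGo_of_none new_paths path (i+1) (fun j hj hjl => h j (by omega) hjl)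
  · rfl
  termination_by path.length - i

theorem pvShortGo_of_first (new_paths : List (List String)) (path : List String) (i k : Nat)
    (hik : i ≤ k) (hk : k < path.length)
    (hrem : pvIsFullyRemoved new_paths (path.take k) = true)
    (hbefore : ∀ j, i ≤ j → j < k → pvIsFullyRemoved new_paths (path.take j) = false) :
    pvShortGo new_paths path i = path.take k := by
  rw [pvShortGo]
  rw [if_pos (by omega : i < path.length)]
  by_cases hi : i = k
  · subst hi
    rw [hrem]
    simp
  · rw [hbefore i le_rfl (by omega)]
    simp only [Bool.false_eq_true, if_false]
    exact pvShortGo_of_first new_paths path (i+1) k (by omega) hk hrem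
      (fun j hj hjl => hbefore j (by omega) hjl)
  termination_by k - i

theorem pvDescend_spec (new_paths : List (List String)) (path : List String) :
    ∀ (comps : List String) (i : Nat), comps = path.drop i → i ≤ path.length →
    (∀ j, j < i → path.take j ∉ new_paths) →
    (∀ j, 1 ≤ j → j ≤ i → pvFilt (path.take j) new_paths ≠ []) →
    pvDescend path comps i (pvFilt (path.take i) new_paths)
      = if pvHasComparable new_paths path then none else some (pvShortGo new_paths path 1) := by
  intro comps
  induction comps with
  | nil =>
    intro i hdrop hile hterm hpref
    have hi : i = path.length := by
      have := List.drop_eq_nil_iff.mp hdrop.symm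
      omega
    subst hi
    rw [List.take_of_length_le le_rfl] at *
    rw [pvDescend]
    by_cases hc : pvFilt path new_paths = []
    · rw [hc]
      have hcomp : pvHasComparable new_paths path = false := by
        rw [Bool.eq_false_iff]
        intro habs
        obtain ⟨np, hm, hor⟩ := (pvHasComparable_iff _ _).mp habs
        rcases hor with hp | hp
        · exact ((pvFilt_eq_nil_iff _ _).mp hc np hm) hp
        · have hnp : np = path.take np.length := List.prefix_iff_eq_take.mp hp
          have hlt : np.length ≤ path.length := hp.length_le
          rcases Nat.lt_or_ge np.length path.length with hl | hl
          · exact hterm np.length hl (hnp ▸ hm)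
          · have : np = path := by rw [hnp, List.take_of_length_le (by omega)]
            subst this
            exact ((pvFilt_eq_nil_iff _ _).mp hc np hm) (List.prefix_refl np)
      rw [hcomp]
      simp only [Bool.false_eq_true, if_false, List.isEmpty_nil, if_true]
      congr 1
      refine (pvShortGo_of_none new_paths path 1 ?_).symm
      intro j h1j hjl
      rw [Bool.eq_false_iff]
      intro habs
      exact hpref j h1j (by omega) ((pvIsFullyRemoved_iff _ _).mp habs)
    · have hcomp : pvHasComparable new_paths path = true := by
        rw [pvHasComparable_iff]
        rw [pvFilt_eq_nil_iff] at hc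
        push Not at hc
        obtain ⟨np, hm, hp⟩ := hc
        exact ⟨np, hm, Or.inl hp⟩
      rw [hcomp]
      simp [List.isEmpty_iff, hc]
  | cons comp rest ih =>
    intro i hdrop hile hterm hpref
    have hi : i < path.length := by
      by_contra habs
      rw [List.drop_eq_nil_iff.mpr (by omega)] at hdrop
      cases hdrop
    have hdi : path.drop i = path[i] :: path.drop (i+1) := List.drop_eq_getElem_cons hi
    rw [hdi] at hdrop
    injection hdrop with hcomp hrest
    subst hcomp
    rw [pvDescend]
    by_cases hterm0 : ((pvFilt (path.take i) new_paths).any (fun c => c.length == i)) = true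
    · rw [if_pos hterm0]
      have hmem : path.take i ∈ new_paths := by
        refine (pvFilt_any_len (path.take i) new_paths).mp ?_
        rw [List.length_take_of_le (le_of_lt hi)]
        exact hterm0
      have : pvHasComparable new_paths path = true := by
        rw [pvHasComparable_iff]
        exact ⟨path.take i, hmem, Or.inr (List.take_prefix i path)⟩
      rw [this]
      rfl
    · rw [if_neg hterm0]
      have hterm' : ∀ j, j < i + 1 → path.take j ∉ new_paths := by
        intro j hj
        rcases Nat.lt_or_ge j i with hl | hl
        · exact hterm j hl
        · have hji : j = i := by omega
          intro hmem
          rw [hji] at hmem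
          refine hterm0 ?_
          have hh := (pvFilt_any_len (path.take i) new_paths).mpr hmem
          rwa [List.length_take_of_le (le_of_lt hi)] at hh
      rw [pvFilt_step path new_paths i hi]
      by_cases hnxt : pvFilt (path.take (i+1)) new_paths = []
      · simp only [hnxt, List.isEmpty_nil, if_true]
        have hcomp : pvHasComparable new_paths path = false := by
          rw [Bool.eq_false_iff]
          intro habs
          obtain ⟨np, hm, hor⟩ := (pvHasComparable_iff _ _).mp habs
          rcases hor with hp | hp
          · have : path.take (i+1) <+: np := (List.take_prefix _ _).trans hp
            exact ((pvFilt_eq_nil_iff _ _).mp hnxt np hm) this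
          · have hnp : np = path.take np.length := List.prefix_iff_eq_take.mp hp
            have hle : np.length ≤ path.length := hp.length_le
            rcases Nat.lt_or_ge np.length (i+1) with hl | hl
            · exact hterm' np.length hl (hnp ▸ hm)
            · have : path.take (i+1) <+: np := by
                rw [hnp]
                exact List.take_prefix_take_left hl
              exact ((pvFilt_eq_nil_iff _ _).mp hnxt np hm) this
        rw [hcomp]
        simp only [Bool.false_eq_true, if_false]
        congr 1
        rcases Nat.lt_or_ge (i+1) path.length with hl | hl
        · refine (pvShortGo_of_first new_paths path 1 (i+1) (by omega) hl
            ((pvIsFullyRemoved_iff _ _).mpr hnxt) ?_).symm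
          intro j h1j hjl
          rw [Bool.eq_false_iff]
          intro habs
          exact hpref j h1j (by omega) ((pvIsFullyRemoved_iff _ _).mp habs)
        · have hieq : i + 1 = path.length := by omega
          rw [hieq, List.take_of_length_le le_rfl]
          refine (pvShortGo_of_none new_paths path 1 ?_).symm
          intro j h1j hjl
          rw [Bool.eq_false_iff]
          intro habs
          exact hpref j h1j (by omega) ((pvIsFullyRemoved_iff _ _).mp habs)
      · rw [if_neg (by simpa [List.isEmpty_iff] using hnxt)]
        exact ih (i+1) hrest (by omega) hterm'
          (fun j h1j hj => by
            rcases Nat.lt_or_ge j (i+1) with hl | hl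
            · exact hpref j h1j (by omega)
            · have : j = i + 1 := by omega
              subst this
              exact hnxt)

theorem pvDescend_eq (new_paths : List (List String)) (path : List String) :
    pvDescend path path 0 new_paths
      = if pvHasComparable new_paths path then none else some (pvShortGo new_paths path 1) := by
  have h := pvDescend_spec new_paths path path 0 (by simp) (by omega)
    (fun j hj => absurd hj (by omega)) (fun j h1j hj => absurd (le_trans h1j hj) (by omega))
  simpa [pvFilt_nil] using h

-- ===== VERDICT (by name: the statement is the Claim_ definition above) =====
theorem find_removed_settings_paths_py_spec : Claim_equal_find_removed_settings_paths_py := by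
  intro old_paths new_paths _
  unfold Spec_find_removed_settings_paths_py
  unfold find_removed_settings_paths_py find_removed_settings_paths_py_alt PySem.Set.diff
  rw [List.foldl_filter]
  have hstep : ∀ (acc : List (List String)) (p : List String),
      (if (!new_paths.contains p) = true then
         (if pvHasComparable new_paths p then acc else PySem.Set.add acc (pvShortGo new_paths p 1))
       else acc)
      = (if new_paths.contains p then acc
         else match pvDescend p p 0 new_paths with
           | none => acc
           | some e => PySem.Set.add acc e) := by
    intro acc p
    cases hc : new_paths.contains p with
    | true => simp
    | false =>
      simp only [Bool.not_false, if_true, Bool.false_eq_true, if_false]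
      rw [pvDescend_eq]
      cases hcomp : pvHasComparable new_paths p <;> simp
  exact congrFun (congrFun (congrArg List.foldl
    (funext fun acc => funext fun p => hstep acc p)) PySem.Set.empty) (PySem.Set.ofList old_paths)
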